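-- pv_equiv track=rewrite | github.com/atilmansour/AI_Assistant_Website | CodeAnalysisData/writingPatterns.py | split_into_bursts
-- ===== SOURCE A (Python) =====
-- from typing import Any, Dict, Iterable, List, Optional, Tuple
--
-- PAUSE_THRESHOLD_MS = 2000
--
-- def split_into_bursts(series: List[Dict[str, Any]]) -> List[List[Dict[str, Any]]]:
--     if not series:
--         return []
--
--     bursts: List[List[Dict[str, Any]]] = [[series[0]]]
--
--     for i in range(1, len(series)):
--         gap = series[i]["t_ms"] - series[i - 1]["t_ms"]
--         if gap >= PAUSE_THRESHOLD_MS: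
--             bursts.append([series[i]])
--         else:
--             bursts[-1].append(series[i])
--
--     return bursts
-- ===== SOURCE B (Python) =====
-- PAUSE_THRESHOLD_MS = 2000
--
-- def split_into_bursts(series):
--     n = len(series)
--     if n == 0:
--         return []
--     cuts = [i for i in range(1, n)
--             if series[i]["t_ms"] - series[i - 1]["t_ms"] >= PAUSE_THRESHOLD_MS]
--     bursts = []
--     prev = 0
--     for c in cuts + [n]:
--         bursts.append(series[prev:c])
--         prev = c
--     return bursts
-- ===== Notes on version B (the rewrite author's own statement) =====
-- stated objective: alternative
-- what changed: A grows the last burst element-by-element inside one loop; B first collects the cut indices where the gap reaches the threshold and then builds the bursts in a second pass by slicing the series between consecutive bounds.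
import Mathlib
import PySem

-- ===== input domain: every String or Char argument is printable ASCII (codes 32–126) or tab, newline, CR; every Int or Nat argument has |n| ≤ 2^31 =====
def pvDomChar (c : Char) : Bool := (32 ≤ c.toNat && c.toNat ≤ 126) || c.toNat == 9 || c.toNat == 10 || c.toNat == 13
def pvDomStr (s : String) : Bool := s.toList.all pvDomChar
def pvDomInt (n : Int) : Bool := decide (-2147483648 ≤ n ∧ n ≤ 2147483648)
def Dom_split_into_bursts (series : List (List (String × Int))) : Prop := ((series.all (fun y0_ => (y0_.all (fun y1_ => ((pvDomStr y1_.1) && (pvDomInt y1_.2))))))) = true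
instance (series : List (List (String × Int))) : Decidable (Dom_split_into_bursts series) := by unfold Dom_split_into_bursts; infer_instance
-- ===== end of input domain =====

-- B replaces A's grow-the-last-burst loop by a cut-point pass plus slicing; objective: alternative decomposition (same cost).

-- series[i]["t_ms"] as both Pythons read it (first-match dict lookup; default 0 is never used inside Pre_)
def pvT (series : List (List (String × Int))) (i : Int) : Int :=
  ((((PySem.List.pyGet? series i).getD []).lookup "t_ms").getD 0)

-- ===== PORT A =====
def split_into_bursts (series : List (List (String × Int))) : List (List (List (String × Int))) :=
  if series.isEmpty then []
  else
    (PySem.List.pyRange 1 (series.length : Int)).foldl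
      (fun bursts i =>
        if pvT series i - pvT series (i - 1) ≥ 2000 then
          bursts ++ [[(PySem.List.pyGet? series i).getD []]]
        else
          bursts.dropLast ++ [((PySem.List.pyGet? bursts (-1)).getD []) ++ [(PySem.List.pyGet? series i).getD []]])
      [[(PySem.List.pyGet? series 0).getD []]]

-- ===== PORT B =====
def split_into_bursts_alt (series : List (List (String × Int))) : List (List (List (String × Int))) :=
  let n : Int := series.length
  if series.length = 0 then []
  else
    let cuts := (PySem.List.pyRange 1 n).filter
      (fun i => pvT series i - pvT series (i - 1) ≥ 2000)
    ((cuts ++ [n]).foldl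
      (fun st c => (st.1 ++ [PySem.List.slice series (some st.2) (some c)], c))
      (([], 0) : List (List (List (String × Int))) × Int)).1

-- ===== PRECONDITION & SPEC =====
-- Pre_ excludes exactly the inputs where Python A raises: with two or more samples, every
-- element must carry a "t_ms" key, otherwise series[i]["t_ms"] is a KeyError.
def Pre_split_into_bursts (series : List (List (String × Int))) : Prop :=
  2 ≤ series.length → ∀ d ∈ series, (d.lookup "t_ms").isSome
instance (series : List (List (String × Int))) : Decidable (Pre_split_into_bursts series) := by
  unfold Pre_split_into_bursts; infer_instance
def pvWitness_split_into_bursts : (List (List (String × Int))) :=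
  [[("t_ms", 0)], [("t_ms", 2500)], [("t_ms", 2600)]]
def Spec_split_into_bursts (series : List (List (String × Int))) (out : List (List (List (String × Int)))) : Prop := out = split_into_bursts_alt series
instance (series : List (List (String × Int))) (out : List (List (List (String × Int)))) : Decidable (Spec_split_into_bursts series out) := by unfold Spec_split_into_bursts; infer_instance

-- ===== CLAIM (what is proved, stated in full; the proofs are below) =====
def Claim_equal_split_into_bursts : Prop := ∀ (series : List (List (String × Int))), Dom_split_into_bursts series → Pre_split_into_bursts series → Spec_split_into_bursts series (split_into_bursts series)

-- ===== LEMMAS AND PROOFS =====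

-- the segments of `series` between consecutive bounds prev, cs…, hi
def pvSegs (series : List (List (String × Int))) : Int → List Int → Int → List (List (List (String × Int)))
  | prev, [], hi => [PySem.List.slice series (some prev) (some hi)]
  | prev, c :: cs, hi => PySem.List.slice series (some prev) (some c) :: pvSegs series c cs hi

theorem pvSegs_ne_nil (s : List (List (String × Int))) (p : Int) (cs : List Int) (hi : Int) :
    pvSegs s p cs hi ≠ [] := by
  cases cs <;> simp [pvSegs]

-- B's fold over (cuts ++ [n]) produces exactly the segments
theorem pvFoldB (s : List (List (String × Int))) (cs : List Int) (hi : Int) :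
    ∀ (acc : List (List (List (String × Int)))) (prev : Int),
    ((cs ++ [hi]).foldl
      (fun st c => (st.1 ++ [PySem.List.slice s (some st.2) (some c)], c)) (acc, prev)).1
      = acc ++ pvSegs s prev cs hi := by
  induction cs with
  | nil => intro acc prev; simp [pvSegs]
  | cons c cs ih =>
    intro acc prev
    rw [List.cons_append, List.foldl_cons, ih]
    simp [pvSegs]

theorem pvSegs_append (s : List (List (String × Int))) (cs : List Int) :
    ∀ (p c hi : Int), pvSegs s p (cs ++ [c]) hi = pvSegs s p cs c ++ [PySem.List.slice s (some c) (some hi)] := by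
  induction cs with
  | nil => intro p c hi; simp [pvSegs]
  | cons c' cs ih => intro p c hi; simp [pvSegs, ih]

-- extending the right bound by one appends series[k] to the last slice
theorem pvSlice_succ (s : List (List (String × Int))) (p k : Int)
    (hp : 0 ≤ p) (hpk : p ≤ k) (hk : k < s.length) :
    PySem.List.slice s (some p) (some (k + 1))
      = PySem.List.slice s (some p) (some k) ++ [(PySem.List.pyGet? s k).getD []] := by
  obtain ⟨pn, rfl⟩ := Int.eq_ofNat_of_zero_le hp
  obtain ⟨kn, rfl⟩ := Int.eq_ofNat_of_zero_le (hp.trans hpk)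
  have hk' : kn < s.length := by exact_mod_cast hk
  have hpk' : pn ≤ kn := by exact_mod_cast hpk
  have h1 : ((kn : Int) + 1) = ((kn + 1 : Nat) : Int) := by push_cast; ring
  rw [h1, PySem.List.slice_natCast, PySem.List.slice_natCast, PySem.List.pyGet?_natCast]
  rw [show kn + 1 - pn = (kn - pn) + 1 by omega, List.take_add_one]
  rw [List.getElem?_drop, show pn + (kn - pn) = kn by omega, List.getElem?_eq_getElem hk']
  simp

theorem pvSegs_extend (s : List (List (String × Int))) (k : Int) (hk : k < s.length) :
    ∀ (cs : List Int) (p : Int), 0 ≤ p → p ≤ k → (∀ c ∈ cs, 0 ≤ c ∧ c ≤ k) →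
    pvSegs s p cs (k + 1)
      = (pvSegs s p cs k).dropLast
        ++ [((PySem.List.pyGet? (pvSegs s p cs k) (-1)).getD []) ++ [(PySem.List.pyGet? s k).getD []]] := by
  intro cs
  induction cs with
  | nil =>
    intro p hp hpk _
    simp [pvSegs, PySem.List.pyGet?_neg_one, pvSlice_succ s p k hp hpk hk]
  | cons c cs ih =>
    intro p hp hpk hmem
    have hc : 0 ≤ c ∧ c ≤ k := hmem c (by simp)
    have hL : pvSegs s c cs k ≠ [] := pvSegs_ne_nil s c cs k
    simp only [pvSegs, ih c hc.1 hc.2 (fun c' hc' => hmem c' (by simp [hc']))]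
    rw [List.dropLast_cons_of_ne_nil hL]
    have : (PySem.List.pyGet? (PySem.List.slice s (some p) (some c) :: pvSegs s c cs k) (-1))
        = PySem.List.pyGet? (pvSegs s c cs k) (-1) := by
      rw [PySem.List.pyGet?_neg_one, PySem.List.pyGet?_neg_one]
      cases h : pvSegs s c cs k with
      | nil => exact absurd h hL
      | cons y ys => simp
    rw [this]
    simp

-- A's loop equals the segments of the cut points, for every prefix of the index range
theorem pvFoldA (s : List (List (String × Int))) :
    ∀ (k : Int), 1 ≤ k → k ≤ s.length →
    ((PySem.List.pyRange 1 k).foldl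
      (fun bursts i =>
        if pvT s i - pvT s (i - 1) ≥ 2000 then
          bursts ++ [[(PySem.List.pyGet? s i).getD []]]
        else
          bursts.dropLast ++ [((PySem.List.pyGet? bursts (-1)).getD []) ++ [(PySem.List.pyGet? s i).getD []]])
      [[(PySem.List.pyGet? s 0).getD []]])
    = pvSegs s 0 ((PySem.List.pyRange 1 k).filter (fun i => pvT s i - pvT s (i - 1) ≥ 2000)) k := by
  intro k hk1
  induction k, hk1 using Int.le_induction with
  | base =>
    intro hlen
    cases s with
    | nil => simp at hlen
    | cons a t =>
      simp [pvSegs, PySem.List.slice_toNat _ (by omega : (0:Int) ≤ 0) (by omega : (0:Int) ≤ 1)]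
  | succ k hk ih =>
    intro hlen
    have hklen : k < (s.length : Int) := by omega
    have ih' := ih (by omega)
    rw [PySem.List.pyRange_one_succ_right (by omega : (1:Int) ≤ k), List.foldl_append, ih',
      List.filter_append]
    simp only [List.foldl_cons, List.foldl_nil, List.filter_cons, List.filter_nil]
    by_cases hg : pvT s k - pvT s (k - 1) ≥ 2000
    · rw [if_pos hg]
      simp only [hg, decide_true, if_true]
      rw [pvSegs_append]
      have h00 : PySem.List.slice s (some k) (some (k + 1))
          = [(PySem.List.pyGet? s k).getD []] := by
        rw [pvSlice_succ s k k (by omega) le_rfl hklen,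
          PySem.List.slice_toNat s (by omega) (by omega)]
        simp
      rw [h00]
    · rw [if_neg hg]
      simp only [hg, decide_false, Bool.false_eq_true, if_false, List.append_nil]
      rw [pvSegs_extend s k hklen _ 0 le_rfl (by omega)
        (fun c hc => by
          have := (PySem.List.mem_pyRange_one.mp (List.mem_of_mem_filter hc))
          omega)]

-- ===== VERDICT (by name: the statement is the Claim_ definition above) =====
theorem split_into_bursts_spec : Claim_equal_split_into_bursts := by
  intro series _ _
  unfold Spec_split_into_bursts split_into_bursts split_into_bursts_alt
  by_cases h : series.isEmpty
  · simp [List.isEmpty_iff.mp h]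
  · have hne : series.length ≠ 0 := by simpa [List.isEmpty_iff, List.length_eq_zero_iff] using h
    simp only [h, if_neg hne]
    rw [pvFoldB, pvFoldA series series.length (by omega) (by omega)]
    simp
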